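-- pv_equiv track=rewrite | github.com/Jeonginsus/study | code/선입선출 스캐줄링.py | solution
-- ===== SOURCE A (Python) =====
-- def is_over(n, cores, num):
--     return_list = []
--     re = 0
--     for c in range(len(cores)):
--         co = cores[c]
--         if num % co == 0:
--             return_list.append(c+1)
--         re += (num // co)+1
--     if re >= n:
--         return (return_list, re-n)
--     return (False, False)
--
-- def solution(n, cores):
--     if n <= len(cores):
--         return n
--     left = 0
--     right = sum(cores)//(len(cores)-1)*n
--     mid = -1
--     while True:
--         if mid == (left+right)//2:
--             break
--         mid = (left+right)//2
--         ll, ln = is_over(n, cores, mid)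
--
--         if ll != False:
--             answer_list, idx = ll, ln
--             right = mid
--         else:
--             left = mid
--
--     return answer_list[-idx-1]
-- ===== SOURCE B (Python) =====
-- def solution(n, cores):
--     k = len(cores)
--     if n <= k:
--         return n
--     j = n - k  # jobs left after the batch started at time 0
--
--     # exact harmonic rate of the farm: j' jobs need about j' * D / N time units
--     D = 1
--     for c in cores:
--         D *= c
--     N = sum(D // c for c in cores)
--
--     # warm start strictly before the j-th extra job, then jump event by event
--     t = max(0, (j - k) * D // N)
--     while sum(t // c for c in cores) < j:
--         t = min((t // c + 1) * c for c in cores)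
--
--     # the j-th job starts at t; pick its core among those finishing at t, in index order
--     pos = j - sum((t - 1) // c for c in cores)
--     for i, c in enumerate(cores):
--         if t % c == 0:
--             pos -= 1
--             if pos == 0:
--                 return i + 1
-- ===== Notes on version B (the rewrite author's own statement) =====
-- stated objective: alternative
-- what changed: Replaces A's binary search over time (probing is_over at midpoints until the midpoint stabilises, then reading the answer off a saved list by negative index) with an event-driven simulation: jump to an exact harmonic-rate warm start t = (j-k)*prod(cores)//sum(prod//c), then advance event by event to the next completion time min((t//c+1)*c) until j jobs have started, and scan the cores in index order at that time.
-- outside the precondition, e.g. on solution(15, [-2, -2, -2, 1]): A returns 3, B returns 1; on solution(2, [1]): A raises ZeroDivisionError, B returns 1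
-- crash fix: When len(cores) == 1 and n > 1 (core positive), A raises ZeroDivisionError computing sum(cores)//(len(cores)-1) while B warm-starts on the single core and returns 1. — e.g. on solution(2, [1]): A raises ZeroDivisionError, B returns 1
import Mathlib
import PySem

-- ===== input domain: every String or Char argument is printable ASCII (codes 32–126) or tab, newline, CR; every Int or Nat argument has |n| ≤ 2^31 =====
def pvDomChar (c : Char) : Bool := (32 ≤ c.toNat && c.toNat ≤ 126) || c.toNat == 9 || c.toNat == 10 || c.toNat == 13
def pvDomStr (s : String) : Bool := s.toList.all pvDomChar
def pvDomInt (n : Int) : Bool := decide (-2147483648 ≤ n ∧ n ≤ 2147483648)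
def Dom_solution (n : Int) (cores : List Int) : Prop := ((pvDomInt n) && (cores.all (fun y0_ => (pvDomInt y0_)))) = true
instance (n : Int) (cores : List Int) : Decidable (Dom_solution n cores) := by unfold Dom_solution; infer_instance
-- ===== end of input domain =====

-- B replaces A's binary search over time with an event-driven simulation: an exact harmonic-rate
-- warm start, then jumps from completion time to completion time until the j-th extra job starts
-- (objective: alternative; no speed claim).

-- ===== PORT A =====
-- is_over's loop over the cores: state (c, return_list, re)
def isOverGo (num : Int) : List Int → Int → List Int → Int → (List Int × Int)
  | [], _, rl, re => (rl, re)
  | co :: rest, c, rl, re =>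
      isOverGo num rest (c + 1)
        (if PySem.Int.mod num co = 0 then rl ++ [c + 1] else rl)
        (re + PySem.Int.floordiv num co + 1)

-- '(False, False)' is ported as none, '(list, int)' as some; 'll != False' is the isSome test
-- (in Python a returned list — even [] — is never equal to False)
def isOver (n : Int) (cores : List Int) (num : Int) : Option (List Int × Int) :=
  let p := isOverGo num cores 0 [] 0
  if n ≤ p.2 then some (p.1, p.2 - n) else none

-- the 'while True' loop; the fuel only makes it total (the proof shows it is never exhausted on Pre_);
-- acc = the last (answer_list, idx) assignment, none = still unbound (Python would raise UnboundLocalError at the break)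
def aLoop (n : Int) (cores : List Int) : Nat → Int → Int → Int → Option (List Int × Int) → Int
  | 0, _, _, _, _ => 0
  | fuel + 1, left, right, mid, acc =>
    if mid = PySem.Int.floordiv (left + right) 2 then
      match acc with
      | some (al, idx) => (PySem.List.pyGet? al (-idx - 1)).getD 0
      | none => 0
    else
      let mid' := PySem.Int.floordiv (left + right) 2
      match isOver n cores mid' with
      | some r => aLoop n cores fuel left mid' mid' (some r)
      | none => aLoop n cores fuel mid' right mid' acc

def solution (n : Int) (cores : List Int) : Int :=
  if n ≤ (cores.length : Int) then n
  else
    let right := PySem.Int.floordiv cores.sum ((cores.length : Int) - 1) * n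
    aLoop n cores (right.toNat + 2) 0 right (-1) none

-- ===== PORT B =====
-- sum(t // c for c in cores): jobs (beyond the initial batch) started by time t
def cntB (t : Int) (cores : List Int) : Int :=
  (cores.map (fun c => PySem.Int.floordiv t c)).sum

-- min((t // c + 1) * c for c in cores): the next completion time after t
def nextT (t : Int) (cores : List Int) : Int :=
  (PySem.List.min? (cores.map (fun c => (PySem.Int.floordiv t c + 1) * c)) (fun x => x)).getD 0

-- the 'while sum(...) < j' event loop; the fuel only makes it total (the proof shows each jump
-- starts at least one more job, so it is never exhausted on Pre_)
def evLoop (cores : List Int) (j : Int) : Nat → Int → Int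
  | 0, t => t
  | fuel + 1, t => if cntB t cores < j then evLoop cores j fuel (nextT t cores) else t

-- the final 'for i, c in enumerate(cores)' scan; falling off the end (Python: return None) is
-- unreachable on Pre_ and ported as 0
def bsScan (r : Int) : List Int → Int → Int → Int
  | [], _, _ => 0
  | c :: cs, i, pos =>
    if PySem.Int.mod r c = 0 then
      (if pos - 1 = 0 then i + 1 else bsScan r cs (i + 1) (pos - 1))
    else bsScan r cs (i + 1) pos

def solution_alt (n : Int) (cores : List Int) : Int :=
  if n ≤ (cores.length : Int) then n
  else
    let k := (cores.length : Int)
    let j := n - k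
    let D := cores.foldl (· * ·) 1
    let N := (cores.map (fun c => PySem.Int.floordiv D c)).sum
    let t0 := max 0 (PySem.Int.floordiv ((j - k) * D) N)
    let r := evLoop cores j ((j - cntB t0 cores).toNat + 1) t0
    bsScan r cores 0 (j - cntB (r - 1) cores)

-- ===== PRECONDITION & SPEC =====
-- Pre_ restricts to the task's natural domain: when n exceeds the core count, A divides by every core
-- value and by len(cores)-1, so it raises on a zero core and on a single core (ZeroDivisionError) and
-- on empty cores (UnboundLocalError); on negative core values A's binary search happens to return an
-- accidental value and is excluded as outside the natural domain (see the cites in the claim).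
def Pre_solution (n : Int) (cores : List Int) : Prop :=
  n ≤ (cores.length : Int) ∨ (2 ≤ cores.length ∧ ∀ c ∈ cores, 1 ≤ c)
instance (n : Int) (cores : List Int) : Decidable (Pre_solution n cores) := by
  unfold Pre_solution; infer_instance

def pvWitness_solution : Int × List Int := (5, [2, 3])

-- When len(cores) == 1 and n > 1 (core positive), A raises ZeroDivisionError computing
-- sum(cores)//(len(cores)-1) while B warm-starts on the single core and returns 1.
def Raises_solution (n : Int) (cores : List Int) : Prop :=
  cores.length = 1 ∧ 1 < n ∧ ∀ c ∈ cores, 1 ≤ c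
instance (n : Int) (cores : List Int) : Decidable (Raises_solution n cores) := by
  unfold Raises_solution; infer_instance
def pvRaiseWitness_solution : Int × List Int := (2, [1])
def pvRaiseWitnessOut_solution : Int := 1

def Spec_solution (n : Int) (cores : List Int) (out : Int) : Prop := out = solution_alt n cores
instance (n : Int) (cores : List Int) (out : Int) : Decidable (Spec_solution n cores out) := by
  unfold Spec_solution; infer_instance

-- ===== CLAIM (what is proved, stated in full; the proofs are below) =====
def Claim_equal_solution : Prop := ∀ (n : Int) (cores : List Int), Dom_solution n cores → Pre_solution n cores → Spec_solution n cores (solution n cores)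
def Claim_raises_solution : Prop := (∀ (n : Int) (cores : List Int), Dom_solution n cores → Raises_solution n cores → ¬ Pre_solution n cores) ∧ (Dom_solution (pvRaiseWitness_solution.1) (pvRaiseWitness_solution.2) ∧ Raises_solution (pvRaiseWitness_solution.1) (pvRaiseWitness_solution.2) ∧ solution_alt (pvRaiseWitness_solution.1) (pvRaiseWitness_solution.2) = pvRaiseWitnessOut_solution)

-- ===== LEMMAS AND PROOFS =====

def idxs (t : Int) : List Int → Int → List Int
  | [], _ => []
  | c :: cs, i => (if PySem.Int.mod t c = 0 then [i + 1] else []) ++ idxs t cs (i + 1)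

-- cntB t cs + len(cs) = A's 're' counter at probe time t;
-- idxs t cs i = 1-based indices (offset i) of the cores finishing exactly at time t, in index order
theorem fd_mono {t t' c : Int} (hc : 1 ≤ c) (h : t ≤ t') :
    PySem.Int.floordiv t c ≤ PySem.Int.floordiv t' c := by
  rw [PySem.Int.floordiv_eq_ediv_of_pos (by omega), PySem.Int.floordiv_eq_ediv_of_pos (by omega)]
  exact Int.ediv_le_ediv (by omega) h

theorem fd_step {t c : Int} (hc : 1 ≤ c) :
    PySem.Int.floordiv t c =
      PySem.Int.floordiv (t - 1) c + (if PySem.Int.mod t c = 0 then 1 else 0) := by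
  have hcpos : (0:Int) < c := by omega
  have hq := (PySem.Int.floordiv_eq_iff_of_pos hcpos (a := t - 1) (q := PySem.Int.floordiv (t-1) c)).mp rfl
  set q := PySem.Int.floordiv (t - 1) c with hqdef
  by_cases hd : PySem.Int.mod t c = 0
  · rcases (PySem.Int.mod_eq_zero_iff_dvd t c).mp hd with ⟨m, hm⟩
    have hm1 : q < m := by nlinarith [hq.1, hq.2]
    have hm2 : m ≤ q + 1 := by nlinarith [hq.1, hq.2]
    have hmq : m = q + 1 := by omega
    simp only [hd, if_pos]
    rw [(PySem.Int.floordiv_eq_iff_of_pos hcpos).mpr ?_]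
    constructor <;> nlinarith [hq.1, hq.2]
  · have hnd : ¬ c ∣ t := fun h => hd ((PySem.Int.mod_eq_zero_iff_dvd t c).mpr h)
    simp only [hd, if_false, add_zero]
    rw [(PySem.Int.floordiv_eq_iff_of_pos hcpos).mpr ?_]
    constructor
    · omega
    · rcases lt_or_eq_of_le (show t ≤ (q+1)*c by omega) with h | h
      · exact h
      · exact absurd (show c ∣ t from ⟨q+1, by linarith [mul_comm c (q+1)]⟩) hnd

theorem cnt_nil (t : Int) : cntB t [] = 0 := rfl
theorem cnt_cons (t c : Int) (cs : List Int) :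
    cntB t (c :: cs) = PySem.Int.floordiv t c + cntB t cs := by simp [cntB]

theorem cnt_mono {t t' : Int} {cs : List Int} (h1 : ∀ c ∈ cs, 1 ≤ c) (h : t ≤ t') :
    cntB t cs ≤ cntB t' cs := by
  induction cs with
  | nil => simp [cnt_nil]
  | cons c cs ih =>
    rw [cnt_cons, cnt_cons]
    have := fd_mono (h1 c (by simp)) h
    have := ih (fun x hx => h1 x (List.mem_cons_of_mem _ hx))
    omega

theorem cnt_zero {cs : List Int} (h1 : ∀ c ∈ cs, 1 ≤ c) : cntB 0 cs = 0 := by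
  induction cs with
  | nil => rfl
  | cons c cs ih =>
    rw [cnt_cons, ih (fun x hx => h1 x (List.mem_cons_of_mem _ hx))]
    have hc := h1 c (by simp)
    rw [PySem.Int.floordiv_eq_ediv_of_pos (by omega)]
    simp

theorem idxs_len {t : Int} {cs : List Int} (h1 : ∀ c ∈ cs, 1 ≤ c) (i : Int) :
    ((idxs t cs i).length : Int) = cntB t cs - cntB (t - 1) cs := by
  induction cs generalizing i with
  | nil => simp [idxs, cnt_nil]
  | cons c cs ih =>
    rw [cnt_cons, cnt_cons]
    have hstep := fd_step (t := t) (h1 c (by simp))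
    have := ih (fun x hx => h1 x (List.mem_cons_of_mem _ hx)) (i + 1)
    simp only [idxs, List.length_append]
    by_cases hd : PySem.Int.mod t c = 0 <;> simp [hd] at hstep ⊢ <;> omega

theorem isOverGo_eq (num : Int) (cs : List Int) : ∀ (i : Int) (rl : List Int) (re : Int),
    isOverGo num cs i rl re = (rl ++ idxs num cs i, re + cntB num cs + cs.length) := by
  induction cs with
  | nil => intro i rl re; simp [isOverGo, idxs, cnt_nil]
  | cons c cs ih =>
    intro i rl re
    rw [isOverGo, ih, cnt_cons]
    by_cases hd : PySem.Int.mod num c = 0 <;>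
      simp [hd, idxs] <;> ring

theorem isOver_eq (n : Int) (cores : List Int) (num : Int) :
    isOver n cores num =
      if n ≤ cntB num cores + (cores.length : Int) then
        some (idxs num cores 0, cntB num cores + (cores.length : Int) - n)
      else none := by
  rw [isOver, isOverGo_eq]
  simp only [List.nil_append, zero_add]

def pickAt (j : Int) (cores : List Int) (r : Int) : Int :=
  (idxs r cores 0).getD (j - cntB (r - 1) cores - 1).toNat 0

theorem pyGet_neg_getD (L : List Int) (z : Int) (h1 : 0 ≤ z) (h2 : z < (L.length : Int)) :
    (PySem.List.pyGet? L (z - (L.length : Int))).getD 0 = L.getD z.toNat 0 := by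
  have hk : z - (L.length : Int) = -(((L.length - z.toNat : Nat) : Int)) := by omega
  have h := congrArg (fun o => Option.getD o 0)
    (PySem.List.pyGet?_neg_natCast L (L.length - z.toNat) (by omega) (by omega))
  simp only at h
  rw [hk, h, show L.length - (L.length - z.toNat) = z.toNat by omega]
  simp [List.getD]

theorem aExitStep (n : Int) (cores : List Int) (h1 : ∀ c ∈ cores, 1 ≤ c)
    (fuel : Nat) (l : Int)
    (hcl : cntB l cores < n - (cores.length : Int))
    (hcr : n - (cores.length : Int) ≤ cntB (l + 1) cores) :
    aLoop n cores (fuel + 1) l (l + 1) l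
        (some (idxs (l + 1) cores 0, cntB (l + 1) cores + (cores.length : Int) - n)) =
      pickAt (n - (cores.length : Int)) cores (l + 1) := by
  have hmid : PySem.Int.floordiv (l + (l + 1)) 2 = l :=
    (PySem.Int.floordiv_eq_iff_of_pos (by norm_num)).mpr (by constructor <;> linarith)
  rw [aLoop, hmid, if_pos rfl]
  have hlen := idxs_len (t := l + 1) h1 0
  rw [show l + 1 - 1 = l by omega] at hlen
  have hz : -(cntB (l + 1) cores + (cores.length : Int) - n) - 1 =
      (n - (cores.length : Int) - cntB l cores - 1) - ((idxs (l + 1) cores 0).length : Int) := by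
    omega
  rw [hz, pyGet_neg_getD _ _ (by omega) (by omega)]
  rw [pickAt, show l + 1 - 1 = l by omega]

theorem aLoop_run (n : Int) (cores : List Int) (h1 : ∀ c ∈ cores, 1 ≤ c) :
    ∀ (fuel : Nat) (l r mid : Int) (acc : Option (List Int × Int)),
      0 ≤ l → l < r → cntB l cores < n - (cores.length : Int) →
      (mid = -1 ∨ mid = l ∨ mid = r) →
      ((acc = none ∧ n - (cores.length : Int) ≤ cntB (r - 1) cores) ∨
        (n - (cores.length : Int) ≤ cntB r cores ∧
          acc = some (idxs r cores 0, cntB r cores + (cores.length : Int) - n))) →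
      (r - l).toNat + 1 ≤ fuel →
      ∃ ρ, 0 < ρ ∧ cntB (ρ - 1) cores < n - (cores.length : Int) ∧
        n - (cores.length : Int) ≤ cntB ρ cores ∧
        aLoop n cores fuel l r mid acc = pickAt (n - (cores.length : Int)) cores ρ := by
  intro fuel
  induction fuel with
  | zero => intro l r mid acc _ _ _ _ _ hf; omega
  | succ fuel ih =>
    intro l r mid acc h0 hlr hcl hmid hacc hf
    have hmb := PySem.Int.floordiv_two_mid_bounds (le_of_lt hlr)
    have hmltr : PySem.Int.floordiv (l + r) 2 < r := by
      rw [PySem.Int.floordiv_lt_iff_lt_mul (by norm_num)]; omega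
    set m := PySem.Int.floordiv (l + r) 2 with hm
    by_cases hex : mid = m
    · -- exit: mid = l and r = l + 1, acc must be some
      have hmidl : mid = l := by
        rcases hmid with h | h | h
        · omega
        · exact h
        · omega
      have hrl : r = l + 1 := by
        have := (PySem.Int.floordiv_eq_iff_of_pos (show (0:Int) < 2 by norm_num)).mp
          (show PySem.Int.floordiv (l + r) 2 = l by omega)
        omega
      rcases hacc with ⟨_, hbad⟩ | ⟨hov, hsome⟩
      · exfalso; rw [hrl] at hbad; simp at hbad; omega
      · rw [hrl] at hov hsome
        rw [hmidl, hrl, hsome]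
        refine ⟨l + 1, by omega, ?_, hov, ?_⟩
        · rw [show l + 1 - 1 = l by omega]; omega
        · exact aExitStep n cores h1 fuel l hcl (by omega)
    · have hstep : aLoop n cores (fuel + 1) l r mid acc =
          (if n ≤ cntB m cores + (cores.length : Int) then
            aLoop n cores fuel l m m (some (idxs m cores 0, cntB m cores + (cores.length : Int) - n))
          else aLoop n cores fuel m r m acc) := by
        rw [aLoop.eq_def]
        simp only [← hm, if_neg hex, isOver_eq]
        split_ifs with hh <;> rfl
      rw [hstep]
      by_cases hov : n ≤ cntB m cores + (cores.length : Int)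
      · rw [if_pos hov]
        have hlm : l < m := by
          rcases lt_or_eq_of_le hmb.1 with h | h
          · exact h
          · exfalso; rw [← h] at hov; omega
        obtain ⟨ρ, p1, p2, p3, p4⟩ := ih l m m (some (idxs m cores 0, cntB m cores + (cores.length : Int) - n))
          h0 hlm hcl (by omega) (by right; exact ⟨by omega, rfl⟩) (by omega)
        exact ⟨ρ, p1, p2, p3, p4⟩
      · rw [if_neg hov]
        rcases lt_or_eq_of_le hmb.1 with hlm | hlm
        · -- m > l : shrink from the left
          obtain ⟨ρ, p1, p2, p3, p4⟩ := ih m r m acc (by omega) (by omega) (by omega)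
            (by omega) hacc (by omega)
          exact ⟨ρ, p1, p2, p3, p4⟩
        · -- m = l : the loop stalls once, then exits; r = l + 1
          have hrl : r = l + 1 := by
            have := (PySem.Int.floordiv_eq_iff_of_pos (show (0:Int) < 2 by norm_num)).mp
              (show PySem.Int.floordiv (l + r) 2 = l by omega)
            omega
          rcases hacc with ⟨_, hbad⟩ | ⟨hov2, hsome⟩
          · exfalso; rw [hrl] at hbad; simp at hbad; omega
          · obtain ⟨fuel', hfuel⟩ : ∃ fuel', fuel = fuel' + 1 := by
              refine ⟨fuel - 1, ?_⟩; omega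
            subst hsome hrl hfuel
            refine ⟨l + 1, by omega, ?_, by omega, ?_⟩
            · rw [show l + 1 - 1 = l by omega]; omega
            · rw [show m = l by omega]
              exact aExitStep n cores h1 fuel' l hcl (by omega)

theorem fd_nonneg {t c : Int} (ht : 0 ≤ t) (hc : 1 ≤ c) : 0 ≤ PySem.Int.floordiv t c := by
  rw [PySem.Int.floordiv_eq_ediv_of_pos (by omega)]
  exact Int.ediv_nonneg ht (by omega)

theorem cnt_nonneg {cs : List Int} {t : Int} (h1 : ∀ c ∈ cs, 1 ≤ c) (ht : 0 ≤ t) :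
    0 ≤ cntB t cs := by
  induction cs with
  | nil => simp [cnt_nil]
  | cons c cs ih =>
    rw [cnt_cons]
    have := fd_nonneg ht (h1 c (by simp))
    have := ih (fun x hx => h1 x (List.mem_cons_of_mem _ hx))
    omega

theorem bsScan_eq (t : Int) (cs : List Int) : ∀ (i pos : Int), 1 ≤ pos →
    pos ≤ ((idxs t cs i).length : Int) →
    bsScan t cs i pos = (idxs t cs i).getD (pos - 1).toNat 0 := by
  induction cs with
  | nil =>
    intro i pos h1 h2
    simp [idxs] at h2
    omega
  | cons c cs ih =>
    intro i pos hp1 hp2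
    by_cases hd : PySem.Int.mod t c = 0
    · rw [bsScan, if_pos hd]
      by_cases hp : pos - 1 = 0
      · have : pos = 1 := by omega
        subst this
        rw [if_pos hp]
        simp [idxs, hd]
      · rw [if_neg hp]
        have hlen : ((idxs t (c :: cs) i).length : Int)
            = 1 + ((idxs t cs (i + 1)).length : Int) := by
          simp [idxs, hd]
          omega
        rw [ih (i + 1) (pos - 1) (by omega) (by omega)]
        simp only [idxs, hd, if_pos, List.singleton_append]
        have he : (pos - 1).toNat = (pos - 1 - 1).toNat + 1 := by omega
        rw [he]
        simp
    · rw [bsScan, if_neg hd]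
      have hlen : (idxs t (c :: cs) i).length = (idxs t cs (i + 1)).length := by
        simp [idxs, hd]
      rw [ih (i + 1) pos hp1 (by omega)]
      simp [idxs, hd]

theorem r_unique {cores : List Int} (h1 : ∀ c ∈ cores, 1 ≤ c) {j r r' : Int}
    (a1 : cntB (r - 1) cores < j) (a2 : j ≤ cntB r cores)
    (b1 : cntB (r' - 1) cores < j) (b2 : j ≤ cntB r' cores) : r = r' := by
  rcases lt_trichotomy r r' with h | h | h
  · exfalso; have := cnt_mono h1 (show r ≤ r' - 1 by omega); omega
  · exact h
  · exfalso; have := cnt_mono h1 (show r' ≤ r - 1 by omega); omega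

theorem sum_ge_len {cs : List Int} (h1 : ∀ c ∈ cs, 1 ≤ c) : (cs.length : Int) ≤ cs.sum := by
  induction cs with
  | nil => simp
  | cons c cs ih =>
    have := h1 c (by simp)
    have := ih (fun x hx => h1 x (List.mem_cons_of_mem _ hx))
    simp only [List.length_cons, List.sum_cons]
    push_cast
    omega

theorem elem_le_sum {cs : List Int} (h1 : ∀ c ∈ cs, 1 ≤ c) {c : Int} (hc : c ∈ cs) :
    c + (cs.length : Int) - 1 ≤ cs.sum := by
  induction cs with
  | nil => simp at hc
  | cons d cs ih =>
    simp only [List.length_cons, List.sum_cons]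
    rcases List.mem_cons.mp hc with h | h
    · have := sum_ge_len (fun x hx => h1 x (List.mem_cons_of_mem _ hx))
      push_cast
      omega
    · have := ih (fun x hx => h1 x (List.mem_cons_of_mem _ hx)) h
      have := h1 d (by simp)
      push_cast
      omega

theorem cnt_lower {cs : List Int} {t M : Int} (h1 : ∀ c ∈ cs, 1 ≤ c) (ht : 0 ≤ t)
    (hM : ∀ c ∈ cs, c ≤ M) (hM0 : 1 ≤ M) :
    (cs.length : Int) * PySem.Int.floordiv t M ≤ cntB t cs := by
  induction cs with
  | nil => simp [cnt_nil]
  | cons c cs ih =>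
    rw [cnt_cons]
    have hc1 := h1 c (by simp)
    have hcM := hM c (by simp)
    have hp : 0 ≤ PySem.Int.floordiv t M := fd_nonneg ht hM0
    have hpc : PySem.Int.floordiv t M ≤ PySem.Int.floordiv t c := by
      rw [PySem.Int.le_floordiv_iff_mul_le (by omega)]
      have h2 : PySem.Int.floordiv t M * M ≤ t := by
        have := (PySem.Int.floordiv_eq_iff_of_pos (show (0:Int) < M by omega)
          (a := t) (q := PySem.Int.floordiv t M)).mp rfl
        omega
      nlinarith
    have := ih (fun x hx => h1 x (List.mem_cons_of_mem _ hx)) (fun x hx => hM x (List.mem_cons_of_mem _ hx))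
    simp only [List.length_cons]
    push_cast
    nlinarith

theorem big_bound {n : Int} {cores : List Int} (h1 : ∀ c ∈ cores, 1 ≤ c)
    (hk : 2 ≤ (cores.length : Int)) (hn : (cores.length : Int) < n) :
    n - (cores.length : Int) ≤
        cntB (PySem.Int.floordiv cores.sum ((cores.length : Int) - 1) * n - 1) cores ∧
      n ≤ PySem.Int.floordiv cores.sum ((cores.length : Int) - 1) * n ∧
      PySem.Int.floordiv cores.sum ((cores.length : Int) - 1) * n ≤ n * cores.sum := by
  set k : Int := (cores.length : Int) with hkdef
  set s : Int := cores.sum with hsdef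
  set q : Int := PySem.Int.floordiv s (k - 1) with hqdef
  have hs : k ≤ s := sum_ge_len h1
  have hq := (PySem.Int.floordiv_eq_iff_of_pos (show (0:Int) < k - 1 by omega)
    (a := s) (q := q)).mp rfl
  have hq1 : 1 ≤ q := by
    rw [hqdef, PySem.Int.le_floordiv_iff_mul_le (by omega)]
    omega
  have hr0n : n ≤ q * n := by nlinarith
  have hM1 : (1:Int) ≤ s - k + 1 := by omega
  have hcM : ∀ c ∈ cores, c ≤ s - k + 1 := fun c hc => by
    have := elem_le_sum h1 hc
    omega
  have hp := (PySem.Int.floordiv_eq_iff_of_pos (show (0:Int) < s - k + 1 by omega)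
    (a := q * n - 1) (q := PySem.Int.floordiv (q * n - 1) (s - k + 1))).mp rfl
  set p : Int := PySem.Int.floordiv (q * n - 1) (s - k + 1) with hpdef
  have hp0 : 0 ≤ p := fd_nonneg (by omega) hM1
  have hclow := cnt_lower h1 (show (0:Int) ≤ q * n - 1 by omega) hcM hM1
  rw [← hpdef, ← hkdef] at hclow
  have e1 : (q + 1) * (k - 1) = q * (k - 1) + (k - 1) := by ring
  have e2 : k * q = q * (k - 1) + q := by ring
  have e3 : (p + 1) * (s - k + 1) = p * (s - k + 1) + (s - k + 1) := by ring
  have key : n - k ≤ k * p := by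
    by_contra hcon
    push Not at hcon
    have c1 : k * p ≤ n - k - 1 := by omega
    have c2 : (k * p) * (s - k + 1) ≤ (n - k - 1) * (s - k + 1) :=
      mul_le_mul_of_nonneg_right c1 (by omega)
    have c3 : k * (q * n - (s - k + 1)) ≤ k * (p * (s - k + 1)) :=
      mul_le_mul_of_nonneg_left (by omega) (by omega)
    have c4 : (s - k + 1 + 2) * n ≤ (k * q) * n :=
      mul_le_mul_of_nonneg_right (by omega) (by omega)
    nlinarith
  have hqs : q ≤ s := by nlinarith
  refine ⟨by omega, hr0n, by nlinarith⟩

-- ===== B-side lemmas: the warm start is strictly before the j-th extra job, and each event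
-- jump starts at least one more job =====

theorem nextT_mem {t : Int} {cores : List Int} (hne : cores ≠ []) :
    ∃ c ∈ cores, nextT t cores = (PySem.Int.floordiv t c + 1) * c := by
  rcases hm : PySem.List.min? (cores.map (fun c => (PySem.Int.floordiv t c + 1) * c)) (fun x => x) with _ | m
  · exfalso
    have := (PySem.List.min?_eq_none_iff (xs := cores.map (fun c => (PySem.Int.floordiv t c + 1) * c)) (key := fun x => x)).mp hm
    simp at this
    exact hne this
  · have hmem := PySem.List.min?_mem hm
    rcases List.mem_map.mp hmem with ⟨c, hc, hval⟩
    exact ⟨c, hc, by simp [nextT, hm, hval.symm]⟩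

theorem nextT_le {t : Int} {cores : List Int} (hne : cores ≠ []) :
    ∀ c ∈ cores, nextT t cores ≤ (PySem.Int.floordiv t c + 1) * c := by
  intro c hc
  rcases hm : PySem.List.min? (cores.map (fun c => (PySem.Int.floordiv t c + 1) * c)) (fun x => x) with _ | m
  · exfalso
    have := (PySem.List.min?_eq_none_iff (xs := cores.map (fun c => (PySem.Int.floordiv t c + 1) * c)) (key := fun x => x)).mp hm
    simp at this
    exact hne this
  · have := PySem.List.min?_isMin hm ((PySem.Int.floordiv t c + 1) * c)
      (List.mem_map.mpr ⟨c, hc, rfl⟩)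
    simpa [nextT, hm] using this

theorem lt_nextT {t : Int} {cores : List Int} (h1 : ∀ c ∈ cores, 1 ≤ c) (hne : cores ≠ []) :
    t < nextT t cores := by
  obtain ⟨c, hc, heq⟩ := nextT_mem (t := t) hne
  have hc1 := h1 c hc
  have := (PySem.Int.floordiv_eq_iff_of_pos (show (0:Int) < c by omega)
    (a := t) (q := PySem.Int.floordiv t c)).mp rfl
  omega

theorem cnt_lt_of_mem {t u c0 : Int} {cs : List Int} (h1 : ∀ c ∈ cs, 1 ≤ c)
    (hc0 : c0 ∈ cs) (htu : t ≤ u)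
    (hfd : PySem.Int.floordiv t c0 + 1 ≤ PySem.Int.floordiv u c0) :
    cntB t cs + 1 ≤ cntB u cs := by
  induction cs with
  | nil => simp at hc0
  | cons d cs ih =>
    rw [cnt_cons, cnt_cons]
    rcases List.mem_cons.mp hc0 with h | h
    · subst h
      have := cnt_mono (fun x hx => h1 x (List.mem_cons_of_mem _ hx)) htu
      omega
    · have := ih (fun x hx => h1 x (List.mem_cons_of_mem _ hx)) h
      have := fd_mono (h1 d (by simp)) htu
      omega

theorem cnt_succ_nextT {t : Int} {cores : List Int} (h1 : ∀ c ∈ cores, 1 ≤ c)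
    (hne : cores ≠ []) : cntB t cores + 1 ≤ cntB (nextT t cores) cores := by
  obtain ⟨c, hc, heq⟩ := nextT_mem (t := t) hne
  have hc1 := h1 c hc
  have hfd : PySem.Int.floordiv (nextT t cores) c = PySem.Int.floordiv t c + 1 := by
    rw [(PySem.Int.floordiv_eq_iff_of_pos (show (0:Int) < c by omega)).mpr ?_]
    constructor
    · rw [heq]
    · rw [heq]; nlinarith
  exact cnt_lt_of_mem h1 hc (le_of_lt (lt_nextT h1 hne)) (by omega)

theorem cnt_congr {a b : Int} {cs : List Int}
    (h : ∀ c ∈ cs, PySem.Int.floordiv a c = PySem.Int.floordiv b c) : cntB a cs = cntB b cs := by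
  induction cs with
  | nil => rfl
  | cons c cs ih =>
    rw [cnt_cons, cnt_cons, h c (by simp), ih (fun x hx => h x (List.mem_cons_of_mem _ hx))]

theorem cnt_pred_nextT {t : Int} {cores : List Int} (h1 : ∀ c ∈ cores, 1 ≤ c)
    (hne : cores ≠ []) : cntB (nextT t cores - 1) cores = cntB t cores := by
  apply cnt_congr
  intro c hc
  have hc1 := h1 c hc
  have hup := nextT_le (t := t) hne c hc
  have hlo := lt_nextT (t := t) h1 hne
  have hmono : PySem.Int.floordiv t c ≤ PySem.Int.floordiv (nextT t cores - 1) c :=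
    fd_mono hc1 (by omega)
  have hlt : PySem.Int.floordiv (nextT t cores - 1) c < PySem.Int.floordiv t c + 1 := by
    rw [PySem.Int.floordiv_lt_iff_lt_mul (show (0:Int) < c by omega)]
    omega
  omega

theorem evLoop_run (cores : List Int) (j : Int) (h1 : ∀ c ∈ cores, 1 ≤ c) (hne : cores ≠ []) :
    ∀ (fuel : Nat) (t : Int), 0 ≤ t → cntB t cores < j → (j - cntB t cores).toNat < fuel →
      1 ≤ evLoop cores j fuel t ∧ cntB (evLoop cores j fuel t - 1) cores < j ∧
        j ≤ cntB (evLoop cores j fuel t) cores := by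
  intro fuel
  induction fuel with
  | zero => intro t _ _ hf; omega
  | succ fuel ih =>
    intro t h0 hlt hf
    rw [evLoop, if_pos hlt]
    have hstep := cnt_succ_nextT (t := t) h1 hne
    have htlt := lt_nextT (t := t) h1 hne
    by_cases hdone : cntB (nextT t cores) cores < j
    · exact ih (nextT t cores) (by omega) hdone (by omega)
    · have hf1 : 1 ≤ fuel := by omega
      obtain ⟨fuel', rfl⟩ : ∃ f', fuel = f' + 1 := ⟨fuel - 1, by omega⟩
      rw [evLoop, if_neg hdone]
      refine ⟨by omega, ?_, by omega⟩
      rw [cnt_pred_nextT h1 hne]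
      omega

theorem foldl_mul_prod (cs : List Int) : cs.foldl (· * ·) 1 = cs.prod := by
  rw [List.prod_eq_foldl]

theorem one_le_prod {cs : List Int} (h1 : ∀ c ∈ cs, 1 ≤ c) : 1 ≤ cs.prod := by
  induction cs with
  | nil => simp
  | cons c cs ih =>
    rw [List.prod_cons]
    have := h1 c (by simp)
    have := ih (fun x hx => h1 x (List.mem_cons_of_mem _ hx))
    nlinarith

theorem fd_prod_ge_one {cs : List Int} (h1 : ∀ c ∈ cs, 1 ≤ c) {c : Int} (hc : c ∈ cs) :
    1 ≤ PySem.Int.floordiv cs.prod c := by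
  have hc1 := h1 c hc
  rw [PySem.Int.le_floordiv_iff_mul_le (show (0:Int) < c by omega)]
  have : c ∣ cs.prod := List.dvd_prod hc
  have := Int.le_of_dvd (by have := one_le_prod h1; omega) this
  omega

-- D * cntB t cs ≤ t * Σ (D // c) when every c ∈ cs divides D (exact harmonic bound)
theorem cnt_D_le {D t : Int} (hD : 1 ≤ D) :
    ∀ (cs : List Int), (∀ c ∈ cs, 1 ≤ c ∧ c ∣ D) →
      D * cntB t cs ≤ t * (cs.map (fun c => PySem.Int.floordiv D c)).sum := by
  intro cs hcs
  induction cs with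
  | nil => simp [cnt_nil]
  | cons c cs ih =>
    obtain ⟨hc1, hcd⟩ := hcs c (by simp)
    have hcpos : (0:Int) < c := by omega
    have he : PySem.Int.floordiv D c * c = D := by
      rw [PySem.Int.floordiv_eq_ediv_of_pos hcpos]
      exact Int.ediv_mul_cancel hcd
    have he0 : 0 ≤ PySem.Int.floordiv D c := by nlinarith [he]
    have hft : PySem.Int.floordiv t c * c ≤ t := by
      have := (PySem.Int.floordiv_eq_iff_of_pos hcpos
        (a := t) (q := PySem.Int.floordiv t c)).mp rfl
      omega
    have hhead : D * PySem.Int.floordiv t c ≤ t * PySem.Int.floordiv D c := by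
      have h2 : PySem.Int.floordiv D c * (PySem.Int.floordiv t c * c) ≤ PySem.Int.floordiv D c * t :=
        mul_le_mul_of_nonneg_left hft he0
      have h3 : PySem.Int.floordiv D c * c * PySem.Int.floordiv t c = D * PySem.Int.floordiv t c := by
        rw [he]
      nlinarith [h2, h3]
    have := ih (fun x hx => hcs x (List.mem_cons_of_mem _ hx))
    rw [cnt_cons]
    simp only [List.map_cons, List.sum_cons]
    nlinarith

theorem main_eq (n : Int) (cores : List Int)
    (hpre : n ≤ (cores.length : Int) ∨ (2 ≤ cores.length ∧ ∀ c ∈ cores, 1 ≤ c)) :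
    solution n cores = solution_alt n cores := by
  by_cases hnk : n ≤ (cores.length : Int)
  · simp [solution, solution_alt, hnk]
  · rcases hpre with h | ⟨hk, h1⟩
    · exact absurd h hnk
    have hkc : (2:Int) ≤ (cores.length : Int) := by exact_mod_cast hk
    have hne : cores ≠ [] := by
      intro h; rw [h] at hk; simp at hk
    simp only [solution, solution_alt, if_neg hnk]
    obtain ⟨hbound, hr0n, hr0ns⟩ := big_bound (n := n) h1 hkc (by omega)
    set r0 : Int := PySem.Int.floordiv cores.sum ((cores.length : Int) - 1) * n with hr0
    have hc0 : cntB 0 cores = 0 := cnt_zero h1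
    obtain ⟨ρA, a1, a2, a3, a4⟩ := aLoop_run n cores h1 (r0.toNat + 2) 0 r0 (-1) none
      (le_refl 0) (by omega) (by rw [hc0]; omega) (Or.inl rfl) (Or.inl ⟨rfl, hbound⟩) (by omega)
    -- the warm start
    set k : Int := (cores.length : Int) with hkdef
    set j : Int := n - k with hjdef
    set D : Int := cores.foldl (· * ·) 1 with hDdef
    have hDprod : D = cores.prod := foldl_mul_prod cores
    have hD1 : 1 ≤ D := by rw [hDprod]; exact one_le_prod h1
    set N : Int := (cores.map (fun c => PySem.Int.floordiv D c)).sum with hNdef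
    have hN1 : k ≤ N := by
      have := sum_ge_len (cs := cores.map (fun c => PySem.Int.floordiv D c))
        (by
          intro x hx
          rcases List.mem_map.mp hx with ⟨c, hc, rfl⟩
          rw [hDprod]
          exact fd_prod_ge_one h1 hc)
      simpa using this
    set t0 : Int := max 0 (PySem.Int.floordiv ((j - k) * D) N) with ht0
    have ht00 : 0 ≤ t0 := le_max_left 0 _
    have hcnt0 : cntB t0 cores < j := by
      rcases max_choice 0 (PySem.Int.floordiv ((j - k) * D) N) with h | h
    -- t0 = 0
      · rw [ht0, h, hc0]; omega
      · have hq := (PySem.Int.floordiv_eq_iff_of_pos (show (0:Int) < N by omega)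
          (a := (j - k) * D) (q := PySem.Int.floordiv ((j - k) * D) N)).mp rfl
        have hmain := cnt_D_le (t := t0) hD1 cores
          (fun c hc => ⟨h1 c hc, by rw [hDprod]; exact List.dvd_prod hc⟩)
        rw [← hNdef] at hmain
        have ht0N : t0 * N ≤ (j - k) * D := by
          rw [ht0, h] at *
          exact hq.1
        have hcnn : 0 ≤ cntB t0 cores := cnt_nonneg h1 ht00
        nlinarith
    obtain ⟨b1, b2, b3⟩ := evLoop_run cores j h1 hne ((j - cntB t0 cores).toNat + 1) t0
      ht00 hcnt0 (by omega)
    set r := evLoop cores j ((j - cntB t0 cores).toNat + 1) t0 with hrdef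
    have hlen := idxs_len (t := r) h1 0
    rw [bsScan_eq r cores 0 (j - cntB (r - 1) cores) (by omega) (by omega)]
    have hρ := r_unique h1 a2 a3 b2 b3
    rw [a4, pickAt, hρ]

theorem main_eq_pre (n : Int) (cores : List Int) (hpre : Pre_solution n cores) :
    solution n cores = solution_alt n cores := by
  unfold Pre_solution at hpre
  exact main_eq n cores hpre

-- ===== VERDICT (by name: the statement is the Claim_ definition above) =====
theorem solution_spec : Claim_equal_solution := by
  intro n cores _ hpre
  unfold Spec_solution
  exact main_eq_pre n cores hpre

theorem solution_raises : Claim_raises_solution := by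
  unfold Claim_raises_solution
  constructor
  · intro n cores _ hr hp
    rcases hr with ⟨h1, h2, _⟩
    rcases hp with h | ⟨h3, _⟩
    · rw [h1] at h; omega
    · omega
  · exact ⟨by decide, by decide, by decide⟩

-- self-check: the crash-fix witness really lies inside Raises_ and B's port returns the stated value there
theorem pvRaiseWitness_ok :
    Raises_solution pvRaiseWitness_solution.1 pvRaiseWitness_solution.2 ∧
      solution_alt pvRaiseWitness_solution.1 pvRaiseWitness_solution.2 = pvRaiseWitnessOut_solution := by
  have h := solution_raises
  unfold Claim_raises_solution at h
  exact ⟨h.2.2.1, h.2.2.2⟩
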